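-- pv_equiv track=rewrite | github.com/stdien/flipstack | tests/test_optimal_pipeline.py | _bfs_optimal_distances
-- ===== SOURCE A (Python) =====
-- from collections import deque
--
-- def _bfs_optimal_distances(n: int) -> dict[tuple[int, ...], int]:
--     """Compute exact optimal distances for all perms of size n via BFS."""
--     identity = tuple(range(n))
--     dist: dict[tuple[int, ...], int] = {identity: 0}
--     queue: deque[tuple[int, ...]] = deque([identity])
--     while queue:
--         state = queue.popleft()
--         d = dist[state]
--         for k in range(2, n + 1):
--             child = state[:k][::-1] + state[k:]
--             if child not in dist:
--                 dist[child] = d + 1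
--                 queue.append(child)
--     return dist
-- ===== SOURCE B (Python) =====
-- def _bfs_optimal_distances(n: int) -> dict[tuple[int, ...], int]:
--     """Compute exact optimal distances for all perms of size n via BFS.
--
--     Two-layer frontier BFS: prefix reversals are involutions, so the state
--     graph is undirected and any neighbour of a layer-d state lies in layer
--     d-1, d or d+1.  Hence freshness of a child is decided by membership in
--     just the previous and current layers (plus the layer under construction)
--     instead of the whole visited dict, and distances are stamped layer by
--     layer by a recursive sweep.
--     """
--     identity = tuple(range(n))
--
--     def grow(dist, prev, cur, d):
--         if not cur:
--             return dist
--         nxt = {}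
--         for state in cur:
--             for k in range(2, n + 1):
--                 child = state[:k][::-1] + state[k:]
--                 if child not in prev and child not in cur and child not in nxt:
--                     nxt[child] = None
--         for child in nxt:
--             dist[child] = d + 1
--         return grow(dist, cur, nxt, d + 1)
--
--     return grow({identity: 0}, {}, {identity: None}, 0)
-- ===== Notes on version B (the rewrite author's own statement) =====
-- stated objective: alternative
-- what changed: Replaces the single-visited-dict FIFO BFS by a recursive two-layer BFS: since every prefix reversal is an involution the state graph is undirected, so a child of a layer-d state can only lie in layers d-1, d or d+1; B therefore tests freshness against just the previous and current layers (plus the layer under construction) instead of the whole visited dict, and stamps distances layer by layer with a counter.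
import Mathlib
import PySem

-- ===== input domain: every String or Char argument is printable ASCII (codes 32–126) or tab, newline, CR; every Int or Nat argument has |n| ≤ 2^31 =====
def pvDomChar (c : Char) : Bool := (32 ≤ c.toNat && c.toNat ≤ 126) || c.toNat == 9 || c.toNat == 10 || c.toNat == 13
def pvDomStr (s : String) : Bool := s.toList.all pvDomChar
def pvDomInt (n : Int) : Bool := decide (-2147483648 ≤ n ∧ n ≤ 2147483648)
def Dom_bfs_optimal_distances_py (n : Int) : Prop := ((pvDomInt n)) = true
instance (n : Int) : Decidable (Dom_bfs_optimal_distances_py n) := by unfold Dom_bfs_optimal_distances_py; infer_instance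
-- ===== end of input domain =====

-- B replaces A's single-visited-dict FIFO BFS by a recursive two-layer BFS (prefix
-- reversals are involutions, so freshness is decided by the last two layers only);
-- same return value, objective: alternative.

-- child = state[:k][::-1] + state[k:]   (identical expression in both Pythons)
def pvChild (state : List Int) (k : Int) : List Int :=
  (PySem.List.slice state none (some k)).reverse ++ PySem.List.slice state (some k) none

-- ===== PORT A =====
-- body of A's inner `for k` loop: if child not in dist: dist[child] = d+1; queue.append(child)
def pvStepA (d : Int) (state : List Int)
    (p : PySem.Dict (List Int) Int × List (List Int)) (k : Int) :
    PySem.Dict (List Int) Int × List (List Int) :=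
  let child := pvChild state k
  if p.1.contains child then p else (p.1.insert child (d + 1), p.2 ++ [child])

-- A's `while queue` loop; fuel only makes the recursion structural (proved sufficient below)
def pvLoopA (n : Int) :
    Nat → PySem.Dict (List Int) Int → List (List Int) → PySem.Dict (List Int) Int
  | 0, dist, _ => dist
  | _ + 1, dist, [] => dist
  | fuel + 1, dist, state :: rest =>
    -- d = dist[state]: the key is always present (every queued state is a dict key)
    let d := dist.getD state 0
    let p := (PySem.List.pyRange 2 (n + 1) 1).foldl (pvStepA d state) (dist, rest)
    pvLoopA n fuel p.1 p.2

def pvFuelA (n : Int) : Nat := n.toNat.factorial * n.toNat + 1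

def bfs_optimal_distances_py (n : Int) : List (List Int × Int) :=
  let identity := PySem.List.pyRange 0 n 1
  (pvLoopA n (pvFuelA n) (PySem.Dict.ofList [(identity, 0)]) [identity]).items

-- ===== PORT B =====
-- body of B's inner `for k` loop: if child not in prev and child not in cur
-- and child not in nxt: nxt[child] = None   (the layer dicts carry only keys → lists)
def pvSiftStep (prev cur : List (List Int)) (state : List Int)
    (nxt : List (List Int)) (k : Int) : List (List Int) :=
  let child := pvChild state k
  if prev.contains child || cur.contains child || nxt.contains child then nxt
  else nxt ++ [child]

-- B's `for state in cur` double loop building nxt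
def pvExpand (n : Int) (prev cur : List (List Int)) : List (List Int) :=
  cur.foldl (fun nxt state =>
    (PySem.List.pyRange 2 (n + 1) 1).foldl (pvSiftStep prev cur state) nxt) []

-- B's recursive `grow`; fuel only makes the recursion structural
def pvGrow (n : Int) :
    Nat → PySem.Dict (List Int) Int → List (List Int) → List (List Int) → Int →
      PySem.Dict (List Int) Int
  | 0, dist, _, _, _ => dist
  | _ + 1, dist, _, [], _ => dist
  | fuel + 1, dist, prev, cur@(_ :: _), d =>
    let nxt := pvExpand n prev cur
    -- for child in nxt: dist[child] = d + 1
    let dist' := nxt.foldl (fun D c => D.insert c (d + 1)) dist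
    pvGrow n fuel dist' cur nxt (d + 1)

def pvFuelB (n : Int) : Nat := n.toNat.factorial + 1

def bfs_optimal_distances_py_alt (n : Int) : List (List Int × Int) :=
  let identity := PySem.List.pyRange 0 n 1
  (pvGrow n (pvFuelB n) (PySem.Dict.ofList [(identity, 0)]) [] [identity] 0).items

-- ===== PRECONDITION & SPEC =====
def Spec_bfs_optimal_distances_py (n : Int) (out : List (List Int × Int)) : Prop := out = bfs_optimal_distances_py_alt n
instance (n : Int) (out : List (List Int × Int)) : Decidable (Spec_bfs_optimal_distances_py n out) := by unfold Spec_bfs_optimal_distances_py; infer_instance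

-- ===== CLAIM (what is proved, stated in full; the proofs are below) =====
def Claim_equal_bfs_optimal_distances_py : Prop := ∀ (n : Int), Dom_bfs_optimal_distances_py n → Spec_bfs_optimal_distances_py n (bfs_optimal_distances_py n)

-- ===== LEMMAS AND PROOFS =====

-- proof-only intermediate: the level-synchronized sweep of one state / one level / the whole loop
def pvLevelB (n d : Int) (p : PySem.Dict (List Int) Int × List (List Int))
    (state : List Int) : PySem.Dict (List Int) Int × List (List Int) :=
  (PySem.List.pyRange 2 (n + 1) 1).foldl (pvStepA d state) p

def pvLoopB (n : Int) :
    Nat → PySem.Dict (List Int) Int → List (List Int) → Int → PySem.Dict (List Int) Int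
  | 0, dist, _, _ => dist
  | _ + 1, dist, [], _ => dist
  | fuel + 1, dist, frontier@(_ :: _), d =>
    let p := frontier.foldl (pvLevelB n d) (dist, [])
    pvLoopB n fuel p.1 p.2 (d + 1)

lemma pvFoldl_acc_shift {α β γ : Type} (g : (γ × List β) → α → (γ × List β))
    (hg : ∀ p x, g p x = ((g (p.1, []) x).1, p.2 ++ (g (p.1, []) x).2))
    (L : List α) (dist : γ) (acc : List β) :
    L.foldl g (dist, acc) =
      ((L.foldl g (dist, [])).1, acc ++ (L.foldl g (dist, [])).2) := by
  induction L generalizing dist acc with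
  | nil => simp
  | cons x L ih =>
    simp only [List.foldl_cons]
    rw [hg (dist, acc) x]
    rcases hx : g (dist, []) x with ⟨D1, s1⟩
    have hx' : g (dist, []) x = (D1, s1) := hx
    dsimp only
    rw [ih D1 (acc ++ s1)]
    conv_rhs => rw [show (D1, s1) = (D1, ([]:List β) ++ s1) by simp, ih D1 ([] ++ s1)]
    simp [List.append_assoc]

lemma pvStepA_shift (d : Int) (state : List Int) :
    ∀ (p : PySem.Dict (List Int) Int × List (List Int)) (k : Int),
      pvStepA d state p k =
        ((pvStepA d state (p.1, []) k).1, p.2 ++ (pvStepA d state (p.1, []) k).2) := by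
  intro p k
  unfold pvStepA
  by_cases h : p.1.contains (pvChild state k) <;> simp [h]

lemma pvFold_spec (L : List Int) (d : Int) (state : List Int) :
    ∀ (dist D : PySem.Dict (List Int) Int) (ks : List (List Int)),
      L.foldl (pvStepA d state) (dist, []) = (D, ks) →
      D.items = dist.items ++ ks.map (fun c => (c, d + 1)) ∧
      (∀ c ∈ ks, dist.contains c = false) ∧ ks.Nodup ∧
      (∀ c ∈ ks, ∃ k, k ∈ L ∧ c = pvChild state k) := by
  induction L with
  | nil =>
    intro dist D ks h
    simp only [List.foldl_nil, Prod.mk.injEq] at h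
    obtain ⟨rfl, rfl⟩ := h
    simp
  | cons k L ih =>
    intro dist D ks h
    simp only [List.foldl_cons] at h
    by_cases hc : dist.contains (pvChild state k)
    · rw [show pvStepA d state (dist, []) k = (dist, []) by simp [pvStepA, hc]] at h
      obtain ⟨h1, h2, h3, h4⟩ := ih dist D ks h
      exact ⟨h1, h2, h3, fun c hcks => by
        obtain ⟨k', hk', hck'⟩ := h4 c hcks
        exact ⟨k', List.mem_cons_of_mem _ hk', hck'⟩⟩
    · rw [show pvStepA d state (dist, []) k
          = (dist.insert (pvChild state k) (d + 1), [] ++ [pvChild state k]) by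
            simp [pvStepA, hc]] at h
      simp only [List.nil_append] at h
      rw [pvFoldl_acc_shift _ (pvStepA_shift d state)] at h
      rcases hE : L.foldl (pvStepA d state) (dist.insert (pvChild state k) (d + 1), []) with ⟨D2, ks2⟩
      rw [hE] at h
      simp only [Prod.mk.injEq] at h
      obtain ⟨rfl, rfl⟩ := h
      obtain ⟨h1, h2, h3, h4⟩ := ih _ D2 ks2 hE
      have hfr : ∀ c ∈ ks2, dist.contains c = false := by
        intro c hcm
        have := h2 c hcm
        rw [PySem.Dict.contains_insert] at this
        simpa using (Bool.or_eq_false_iff.mp this).2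
      have hnotin : pvChild state k ∉ ks2 := by
        intro hmem
        have := h2 _ hmem
        rw [PySem.Dict.contains_insert_self] at this
        simp at this
      refine ⟨?_, ?_, ?_, ?_⟩
      · rw [h1, PySem.Dict.items_insert_of_not_contains _ _ (by simpa using hc)]
        simp [List.append_assoc]
      · intro c hcm
        rcases List.mem_cons.mp hcm with rfl | hcm'
        · simpa using hc
        · exact hfr c hcm'
      · exact List.nodup_cons.mpr ⟨hnotin, h3⟩
      · intro c hcm
        rcases List.mem_cons.mp hcm with rfl | hcm'
        · exact ⟨k, List.mem_cons_self .., rfl⟩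
        · obtain ⟨k', hk', hck'⟩ := h4 c hcm'
          exact ⟨k', List.mem_cons_of_mem _ hk', hck'⟩

lemma pvItems_keys {D dist : PySem.Dict (List Int) Int} {ks : List (List Int)} {v : Int}
    (h : D.items = dist.items ++ ks.map (fun c => (c, v))) :
    D.keys = dist.keys ++ ks := by
  simp only [PySem.Dict.keys, h, List.map_append, List.map_map]
  congr 1
  exact List.map_id'' (congrFun rfl) ks

lemma pvItems_nodup {D dist : PySem.Dict (List Int) Int} {ks : List (List Int)} {v : Int}
    (h : D.items = dist.items ++ ks.map (fun c => (c, v)))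
    (hnd : dist.keys.Nodup) (hks : ks.Nodup)
    (hfr : ∀ c ∈ ks, dist.contains c = false) : D.keys.Nodup := by
  rw [pvItems_keys h]
  refine List.nodup_append.mpr ⟨hnd, hks, ?_⟩
  have hdis : ∀ a ∈ dist.keys, a ∉ ks := by
    intro a ha hb
    have := hfr a hb
    rw [← PySem.Dict.contains_iff_mem_keys] at ha
    rw [ha] at this
    exact Bool.noConfusion this
  exact fun a a_1 b a_2 => ne_of_mem_of_not_mem a_1 fun a => hdis b a a_2

lemma pvGet?_mono {D dist : PySem.Dict (List Int) Int} {ks : List (List Int)} {v : Int}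
    (h : D.items = dist.items ++ ks.map (fun c => (c, v)))
    (hnd' : D.keys.Nodup) :
    ∀ s w, dist.get? s = some w → D.get? s = some w := by
  intro s w hw
  have hm : (s, w) ∈ D.items := by
    rw [h]; exact List.mem_append_left _ (PySem.Dict.mem_items_of_get?_eq_some _ hw)
  exact PySem.Dict.get?_of_mem_items _ hm hnd'

lemma pvGet?_kid {D dist : PySem.Dict (List Int) Int} {ks : List (List Int)} {v : Int}
    (h : D.items = dist.items ++ ks.map (fun c => (c, v)))
    (hnd' : D.keys.Nodup) :
    ∀ c ∈ ks, D.get? c = some v := by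
  intro c hcm
  have hm : (c, v) ∈ D.items := by
    rw [h]
    exact List.mem_append_right _ (List.mem_map.mpr ⟨c, hcm, rfl⟩)
  exact PySem.Dict.get?_of_mem_items _ hm hnd'

lemma pvMem_keys_of_get? {dist : PySem.Dict (List Int) Int} {s : List Int} {w : Int}
    (h : dist.get? s = some w) : s ∈ dist.keys :=
  PySem.Dict.mem_keys_of_mem_items _ (PySem.Dict.mem_items_of_get?_eq_some _ h)

lemma pvSize_of_items {D dist : PySem.Dict (List Int) Int} {ks : List (List Int)} {v : Int}
    (h : D.items = dist.items ++ ks.map (fun c => (c, v))) :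
    D.size = dist.size + ks.length := by
  simp [PySem.Dict.size, h]

lemma pvChild_perm (state : List Int) (k : Int) (hk : 0 ≤ k) :
    (pvChild state k).Perm state := by
  obtain ⟨m, rfl⟩ := Int.eq_ofNat_of_zero_le hk
  unfold pvChild
  rw [PySem.List.slice_to_natCast, PySem.List.slice_from_natCast]
  calc ((state.take m).reverse ++ state.drop m).Perm (state.take m ++ state.drop m) :=
        (List.reverse_perm _).append_right _
    _ = state := List.take_append_drop m state

def pvIdent (n : Int) : List Int := PySem.List.pyRange 0 n 1

lemma pvLevelB_shift (n d : Int) :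
    ∀ (p : PySem.Dict (List Int) Int × List (List Int)) (s : List Int),
      pvLevelB n d p s = ((pvLevelB n d (p.1, []) s).1, p.2 ++ (pvLevelB n d (p.1, []) s).2) := by
  intro p s
  rcases p with ⟨dist, acc⟩
  unfold pvLevelB
  exact pvFoldl_acc_shift _ (pvStepA_shift d s) _ dist acc

-- children of one expansion are fresh permutations of the identity
lemma pvKids_perm {n : Int} {state : List Int} {ks : List (List Int)}
    (hs : state.Perm (pvIdent n))
    (h4 : ∀ c ∈ ks, ∃ k, k ∈ PySem.List.pyRange 2 (n + 1) 1 ∧ c = pvChild state k) :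
    ∀ c ∈ ks, c.Perm (pvIdent n) := by
  intro c hcm
  obtain ⟨k, hk, rfl⟩ := h4 c hcm
  have hk2 := (PySem.List.mem_pyRange_one.mp hk).1
  exact (pvChild_perm state k (by omega)).trans hs

lemma pvLevel_spec (n d : Int) (f : List (List Int)) :
    ∀ (dist D : PySem.Dict (List Int) Int) (ks : List (List Int)),
      f.foldl (pvLevelB n d) (dist, []) = (D, ks) →
      dist.keys.Nodup → (∀ s ∈ dist.keys, s.Perm (pvIdent n)) →
      (∀ s ∈ f, dist.get? s = some d) →
      D.items = dist.items ++ ks.map (fun c => (c, d + 1)) ∧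
      (∀ c ∈ ks, dist.contains c = false) ∧ ks.Nodup ∧
      (∀ c ∈ ks, c.Perm (pvIdent n)) ∧
      (ks ≠ [] → 2 ≤ n) := by
  induction f with
  | nil =>
    intro dist D ks h
    simp only [List.foldl_nil, Prod.mk.injEq] at h
    obtain ⟨rfl, rfl⟩ := h
    simp
  | cons s f ih =>
    intro dist D ks h hnd hperm hf
    simp only [List.foldl_cons] at h
    have hlev : pvLevelB n d (dist, []) s
        = (PySem.List.pyRange 2 (n + 1) 1).foldl (pvStepA d s) (dist, []) := rfl
    rcases hE : (PySem.List.pyRange 2 (n + 1) 1).foldl (pvStepA d s) (dist, []) with ⟨D1, ks1⟩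
    rw [hlev, hE] at h
    obtain ⟨h1, h2, h3, h4⟩ := pvFold_spec _ d s dist D1 ks1 hE
    have hsmem : s ∈ dist.keys := pvMem_keys_of_get? (hf s (List.mem_cons_self ..))
    have hkperm1 : ∀ c ∈ ks1, c.Perm (pvIdent n) := pvKids_perm (hperm s hsmem) h4
    have hkeys1 : D1.keys = dist.keys ++ ks1 := pvItems_keys h1
    have hnd1 : D1.keys.Nodup := pvItems_nodup h1 hnd h3 h2
    -- shift the accumulator ks1 out of the remaining fold
    rw [pvFoldl_acc_shift _ (pvLevelB_shift n d) f D1 ks1] at h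
    rcases hF : f.foldl (pvLevelB n d) (D1, []) with ⟨D2, ks2⟩
    rw [hF] at h
    simp only [Prod.mk.injEq] at h
    obtain ⟨rfl, rfl⟩ := h
    have hperm1 : ∀ t ∈ D1.keys, t.Perm (pvIdent n) := by
      intro t ht
      rw [hkeys1] at ht
      rcases List.mem_append.mp ht with ht' | ht'
      · exact hperm t ht'
      · exact hkperm1 t ht'
    have hf1 : ∀ t ∈ f, D1.get? t = some d := fun t ht =>
      pvGet?_mono h1 hnd1 t d (hf t (List.mem_cons_of_mem _ ht))
    obtain ⟨g1, g2, g3, g4, g5⟩ := ih D1 D2 ks2 hF hnd1 hperm1 hf1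
    have hcontmono : ∀ c, dist.contains c = true → D1.contains c = true := by
      intro c hcc
      rw [PySem.Dict.contains_iff_mem_keys] at hcc ⊢
      rw [hkeys1]
      exact List.mem_append_left _ hcc
    refine ⟨?_, ?_, ?_, ?_, ?_⟩
    · rw [g1, h1]
      simp [List.append_assoc]
    · intro c hcm
      rcases List.mem_append.mp hcm with hcm' | hcm'
      · exact h2 c hcm'
      · cases hdc : dist.contains c with
        | false => rfl
        | true => have := g2 c hcm'; rw [hcontmono c hdc] at this; exact this
    · refine List.nodup_append.mpr ⟨h3, g3, ?_⟩
      have hdis : ∀ a ∈ ks1, a ∉ ks2 := by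
        intro a ha hb
        have : D1.contains a = true := by
          rw [PySem.Dict.contains_iff_mem_keys, hkeys1]
          exact List.mem_append_right _ ha
        rw [g2 a hb] at this
        exact Bool.noConfusion this
      exact fun a a_1 b a_2 => ne_of_mem_of_not_mem a_1 fun a => hdis b (by assumption) a_2
    · intro c hcm
      rcases List.mem_append.mp hcm with hcm' | hcm'
      · exact hkperm1 c hcm'
      · exact g4 c hcm'
    · intro hne
      rcases (show ks1 ≠ [] ∨ ks2 ≠ [] by
        by_contra hcon
        push Not at hcon
        exact hne (by simp [hcon.1, hcon.2])) with h' | h'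
      · obtain ⟨c, hcm⟩ := List.exists_mem_of_ne_nil _ h'
        obtain ⟨k, hk, -⟩ := h4 c hcm
        have := PySem.List.mem_pyRange_one.mp hk
        omega
      · exact g5 h'

lemma pvLoopA_level (n d : Int) (f : List (List Int)) :
    ∀ (fuel : Nat) (dist : PySem.Dict (List Int) Int) (g : List (List Int)),
      dist.keys.Nodup → (∀ s ∈ dist.keys, s.Perm (pvIdent n)) →
      (∀ s ∈ f, dist.get? s = some d) →
      pvLoopA n (fuel + f.length) dist (f ++ g) =
        pvLoopA n fuel (f.foldl (pvLevelB n d) (dist, g)).1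
          (f.foldl (pvLevelB n d) (dist, g)).2 := by
  induction f with
  | nil => intro fuel dist g _ _ _; simp
  | cons s t ih =>
    intro fuel dist g hnd hperm hf
    have hgetd : dist.getD s 0 = d := by
      rw [PySem.Dict.getD_eq_get?_getD, hf s (List.mem_cons_self ..)]
      rfl
    rcases hE : (PySem.List.pyRange 2 (n + 1) 1).foldl (pvStepA d s) (dist, []) with ⟨D1, ks1⟩
    obtain ⟨h1, h2, h3, h4⟩ := pvFold_spec _ d s dist D1 ks1 hE
    have hnd1 : D1.keys.Nodup := pvItems_nodup h1 hnd h3 h2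
    have hsmem : s ∈ dist.keys := pvMem_keys_of_get? (hf s (List.mem_cons_self ..))
    have hkeys1 : D1.keys = dist.keys ++ ks1 := pvItems_keys h1
    have hperm1 : ∀ u ∈ D1.keys, u.Perm (pvIdent n) := by
      intro u hu
      rw [hkeys1] at hu
      rcases List.mem_append.mp hu with hu' | hu'
      · exact hperm u hu'
      · exact pvKids_perm (hperm s hsmem) h4 u hu'
    have hft : ∀ u ∈ t, D1.get? u = some d := fun u hu =>
      pvGet?_mono h1 hnd1 u d (hf u (List.mem_cons_of_mem _ hu))
    -- unfold one pop of A
    have hstep : pvLoopA n (fuel + (s :: t).length) dist ((s :: t) ++ g)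
        = pvLoopA n (fuel + t.length) D1 (t ++ (g ++ ks1)) := by
      have : fuel + (s :: t).length = (fuel + t.length) + 1 := by simp; omega
      rw [this]
      show pvLoopA n ((fuel + t.length) + 1) dist (s :: (t ++ g)) = _
      simp only [pvLoopA, hgetd]
      rw [pvFoldl_acc_shift _ (pvStepA_shift d s) _ dist (t ++ g), hE]
      simp [List.append_assoc]
    rw [hstep, ih (fuel) D1 (g ++ ks1) hnd1 hperm1 hft]
    have hlev : pvLevelB n d (dist, g) s = (D1, g ++ ks1) := by
      unfold pvLevelB
      rw [pvFoldl_acc_shift _ (pvStepA_shift d s) _ dist g, hE]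
    simp only [List.foldl_cons, hlev]

def pvC (n : Int) : Nat := n.toNat
def pvN (n : Int) : Nat := n.toNat.factorial

def pvInv (n : Int) (dist : PySem.Dict (List Int) Int) (q : List (List Int)) : Prop :=
  dist.keys.Nodup ∧ (∀ s ∈ dist.keys, s.Perm (pvIdent n)) ∧ (∀ s ∈ q, s ∈ dist.keys)

def pvMuA (n : Int) (dist : PySem.Dict (List Int) Int) (q : List (List Int)) : Nat :=
  (pvN n - dist.size) * pvC n + q.length

def pvMuB (n : Int) (dist : PySem.Dict (List Int) Int) (q : List (List Int)) : Nat :=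
  (pvN n - dist.size) + (if q = [] then 0 else 1)

lemma pvInv_size_le {n : Int} {dist : PySem.Dict (List Int) Int} {q : List (List Int)}
    (h : pvInv n dist q) : dist.size ≤ pvN n := by
  obtain ⟨hnd, hperm, -⟩ := h
  have hsub : dist.keys ⊆ (pvIdent n).permutations := by
    intro s hs
    exact List.mem_permutations.mpr (hperm s hs)
  have hle := (hnd.subperm hsub).length_le
  rw [List.length_permutations] at hle
  have hlen : (pvIdent n).length = n.toNat := by
    simp [pvIdent, PySem.List.length_pyRange_one]
  rw [hlen] at hle
  simpa [PySem.Dict.size, PySem.Dict.keys, pvN] using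
    (by simpa [PySem.Dict.keys] using hle : dist.items.length ≤ n.toNat.factorial)

lemma pvMu_arith (Nn Cc size c q : Nat) (h1 : size + c ≤ Nn) (hc : c = 0 ∨ 1 ≤ Cc) :
    (Nn - (size + c)) * Cc + (q + c) ≤ (Nn - size) * Cc + q := by
  rcases hc with rfl | hc
  · simp
  · have h2 : Nn - size = (Nn - (size + c)) + c := by omega
    rw [h2, add_mul]
    have h3 : c ≤ c * Cc := Nat.le_mul_of_pos_right c (by omega)
    omega

lemma pvLoopA_pop (n : Int) (dist : PySem.Dict (List Int) Int)
    (s : List Int) (rest : List (List Int)) (hinv : pvInv n dist (s :: rest)) :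
    ∃ D q', (∀ fuel, pvLoopA n (fuel + 1) dist (s :: rest) = pvLoopA n fuel D q') ∧
      pvInv n D q' ∧ pvMuA n D q' + 1 ≤ pvMuA n dist (s :: rest) := by
  obtain ⟨hnd, hperm, hq⟩ := hinv
  set d := dist.getD s 0 with hd
  rcases hE : (PySem.List.pyRange 2 (n + 1) 1).foldl (pvStepA d s) (dist, []) with ⟨D1, ks1⟩
  obtain ⟨h1, h2, h3, h4⟩ := pvFold_spec _ d s dist D1 ks1 hE
  have hnd1 : D1.keys.Nodup := pvItems_nodup h1 hnd h3 h2
  have hkeys1 : D1.keys = dist.keys ++ ks1 := pvItems_keys h1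
  have hsmem : s ∈ dist.keys := hq s (List.mem_cons_self ..)
  have hperm1 : ∀ u ∈ D1.keys, u.Perm (pvIdent n) := by
    intro u hu
    rw [hkeys1] at hu
    rcases List.mem_append.mp hu with hu' | hu'
    · exact hperm u hu'
    · exact pvKids_perm (hperm s hsmem) h4 u hu'
  refine ⟨D1, rest ++ ks1, ?_, ⟨hnd1, hperm1, ?_⟩, ?_⟩
  · intro fuel
    simp only [pvLoopA]
    rw [pvFoldl_acc_shift _ (pvStepA_shift d s) _ dist rest, hE]
  · intro u hu
    rw [hkeys1]
    rcases List.mem_append.mp hu with hu' | hu'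
    · exact List.mem_append_left _ (hq u (List.mem_cons_of_mem _ hu'))
    · exact List.mem_append_right _ hu'
  · have hsz : D1.size = dist.size + ks1.length := pvSize_of_items h1
    have hszle : D1.size ≤ pvN n := pvInv_size_le (n := n) (q := rest ++ ks1) ⟨hnd1, hperm1, by
      intro u hu
      rw [hkeys1]
      rcases List.mem_append.mp hu with hu' | hu'
      · exact List.mem_append_left _ (hq u (List.mem_cons_of_mem _ hu'))
      · exact List.mem_append_right _ hu'⟩
    have hcC : ks1.length = 0 ∨ 1 ≤ pvC n := by
      cases ks1 with
      | nil => left; rfl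
      | cons a l =>
        right
        obtain ⟨k, hk, -⟩ := h4 a (List.mem_cons_self ..)
        have := PySem.List.mem_pyRange_one.mp hk
        simp [pvC]; omega
    have := pvMu_arith (pvN n) (pvC n) dist.size ks1.length rest.length
      (by omega) hcC
    simp only [pvMuA, List.length_append, List.length_cons, hsz]
    omega

lemma pvLoopA_nil (n : Int) (dist : PySem.Dict (List Int) Int) :
    ∀ fuel, pvLoopA n fuel dist [] = dist := by
  intro fuel
  cases fuel <;> simp [pvLoopA]

lemma pvLoopA_stable (n : Int) :
    ∀ (fuel : Nat) (dist : PySem.Dict (List Int) Int) (q : List (List Int)),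
      pvInv n dist q → pvMuA n dist q ≤ fuel →
      pvLoopA n fuel dist q = pvLoopA n (fuel + 1) dist q := by
  intro fuel
  induction fuel with
  | zero =>
    intro dist q hinv hmu
    have : q = [] := by
      cases q with
      | nil => rfl
      | cons a l => simp [pvMuA] at hmu
    subst this
    rw [pvLoopA_nil, pvLoopA_nil]
  | succ fuel ih =>
    intro dist q hinv hmu
    cases q with
    | nil => rw [pvLoopA_nil, pvLoopA_nil]
    | cons s rest =>
      obtain ⟨D, q', heq, hinv', hmu'⟩ := pvLoopA_pop n dist s rest hinv
      rw [heq fuel, heq (fuel + 1)]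
      exact ih D q' hinv' (by omega)

lemma pvLoopA_ge (n : Int) (dist : PySem.Dict (List Int) Int) (q : List (List Int))
    (hinv : pvInv n dist q) :
    ∀ (f1 f2 : Nat), pvMuA n dist q ≤ f1 → f1 ≤ f2 →
      pvLoopA n f1 dist q = pvLoopA n f2 dist q := by
  intro f1 f2 hmu hle
  induction f2, hle using Nat.le_induction with
  | base => rfl
  | succ m hm ih => rw [ih, pvLoopA_stable n m dist q hinv (by omega)]

lemma pvLoopA_congr (n : Int) (dist : PySem.Dict (List Int) Int) (q : List (List Int))
    (hinv : pvInv n dist q) (f1 f2 : Nat)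
    (h1 : pvMuA n dist q ≤ f1) (h2 : pvMuA n dist q ≤ f2) :
    pvLoopA n f1 dist q = pvLoopA n f2 dist q := by
  rcases le_total f1 f2 with h | h
  · exact pvLoopA_ge n dist q hinv f1 f2 h1 h
  · exact (pvLoopA_ge n dist q hinv f2 f1 h2 h).symm

lemma pvLoopB_nil (n : Int) (dist : PySem.Dict (List Int) Int) (d : Int) :
    ∀ fuel, pvLoopB n fuel dist [] d = dist := by
  intro fuel
  cases fuel <;> simp [pvLoopB]

lemma pvMain (n : Int) :
    ∀ (fuelB : Nat) (dist : PySem.Dict (List Int) Int) (frontier : List (List Int))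
      (d : Int) (fuelA : Nat),
      pvInv n dist frontier → (∀ s ∈ frontier, dist.get? s = some d) →
      pvMuB n dist frontier ≤ fuelB → pvMuA n dist frontier ≤ fuelA →
      pvLoopA n fuelA dist frontier = pvLoopB n fuelB dist frontier d := by
  intro fuelB
  induction fuelB with
  | zero =>
    intro dist frontier d fuelA hinv hf hmb hma
    have : frontier = [] := by
      cases frontier with
      | nil => rfl
      | cons a l => simp [pvMuB] at hmb
    subst this
    rw [pvLoopA_nil, pvLoopB_nil]
  | succ fuelB ih =>
    intro dist frontier d fuelA hinv hf hmb hma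
    cases frontier with
    | nil => rw [pvLoopA_nil, pvLoopB_nil]
    | cons s f' =>
      obtain ⟨hnd, hperm, hq⟩ := hinv
      rcases hP : (s :: f').foldl (pvLevelB n d) (dist, []) with ⟨D, nxt⟩
      obtain ⟨h1, h2, h3, h4, h5⟩ := pvLevel_spec n d (s :: f') dist D nxt hP hnd hperm hf
      have hnd' : D.keys.Nodup := pvItems_nodup h1 hnd h3 h2
      have hkeys' : D.keys = dist.keys ++ nxt := pvItems_keys h1
      have hperm' : ∀ u ∈ D.keys, u.Perm (pvIdent n) := by
        intro u hu
        rw [hkeys'] at hu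
        rcases List.mem_append.mp hu with hu' | hu'
        · exact hperm u hu'
        · exact h4 u hu'
      have hinv' : pvInv n D nxt := ⟨hnd', hperm', by
        intro u hu; rw [hkeys']; exact List.mem_append_right _ hu⟩
      have hf' : ∀ c ∈ nxt, D.get? c = some (d + 1) := pvGet?_kid h1 hnd'
      have hsz : D.size = dist.size + nxt.length := pvSize_of_items h1
      have hszle : D.size ≤ pvN n := pvInv_size_le hinv'
      -- B takes one level
      have hB : pvLoopB n (fuelB + 1) dist (s :: f') d = pvLoopB n fuelB D nxt (d + 1) := by
        simp only [pvLoopB, hP]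
      -- A pops the whole level
      set fuel0 := max (pvMuA n D nxt) (pvMuA n dist (s :: f')) with hfuel0
      have hA1 : pvLoopA n fuelA dist (s :: f')
          = pvLoopA n (fuel0 + (s :: f').length) dist (s :: f') := by
        refine pvLoopA_congr n dist (s :: f') ⟨hnd, hperm, hq⟩ _ _ hma ?_
        calc pvMuA n dist (s :: f') ≤ fuel0 := le_max_right _ _
          _ ≤ fuel0 + (s :: f').length := Nat.le_add_right _ _
      have hA2 : pvLoopA n (fuel0 + (s :: f').length) dist (s :: f')
          = pvLoopA n fuel0 D nxt := by
        have := pvLoopA_level n d (s :: f') fuel0 dist [] hnd hperm hf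
        rw [List.append_nil] at this
        rw [this, hP]
      have hmb' : pvMuB n D nxt ≤ fuelB := by
        simp only [pvMuB, if_neg (by simp : ¬((s :: f') : List (List Int)) = [])] at hmb
        cases nxt with
        | nil =>
          have hsz' : D.size = dist.size := by simpa using hsz
          simp only [pvMuB, hsz']
          simp
          omega
        | cons a l =>
          have hl : 1 ≤ (a :: l).length := by simp
          rw [hsz] at hszle
          simp only [pvMuB, if_neg (by simp : ¬((a :: l) : List (List Int)) = []), hsz]
          have hlen : D.size = dist.size + (a :: l).length := hsz
          omega
      rw [hA1, hA2, hB]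
      exact ih D nxt (d + 1) fuel0 hinv' hf' hmb' (le_max_left _ _)

lemma pvInit_items (n : Int) :
    (PySem.Dict.ofList [(pvIdent n, (0 : Int))]).items = [(pvIdent n, (0 : Int))] := by
  rfl

-- ===== the two-layer correspondence (level-synchronized loop = pvGrow) =====

-- prefix reversal is an involution (for the nonnegative k of range(2, n+1))
lemma pvChild_invol (s : List Int) (k : Int) (hk : 0 ≤ k) :
    pvChild (pvChild s k) k = s := by
  obtain ⟨m, rfl⟩ := Int.eq_ofNat_of_zero_le hk
  unfold pvChild
  rw [PySem.List.slice_to_natCast, PySem.List.slice_from_natCast,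
      PySem.List.slice_to_natCast, PySem.List.slice_from_natCast]
  rcases le_or_gt m s.length with hm | hm
  · have hlen : ((s.take m).reverse).length = m := by
      simp [Nat.min_eq_left hm]
    rw [List.take_append_of_le_length (by omega), List.drop_append_of_le_length (by omega)]
    rw [List.take_of_length_le (by omega), List.drop_of_length_le (by omega)]
    simp
  · have ht : s.take m = s := List.take_of_length_le (by omega)
    have hd : s.drop m = [] := List.drop_of_length_le (by omega)
    rw [ht, hd, List.append_nil,
        List.take_of_length_le (by simp; omega), List.drop_of_length_le (by simp; omega)]
    simp

-- the two-layer invariant: visited = K ++ prev ++ cur with K closed under children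
def pvInv2 (n : Int) (dist : PySem.Dict (List Int) Int)
    (prev cur : List (List Int)) : Prop :=
  ∃ K : List (List Int),
    dist.keys = K ++ prev ++ cur ∧ dist.keys.Nodup ∧
    (∀ c ∈ K, ∀ k ∈ PySem.List.pyRange 2 (n + 1) 1, pvChild c k ∈ K ++ prev) ∧
    (∀ s ∈ prev, ∀ k ∈ PySem.List.pyRange 2 (n + 1) 1, pvChild s k ∈ K ++ prev ++ cur)

-- under the invariant, a child of a current state lies in K only if it contradicts nodup:
-- freshness against dist equals freshness against prev ++ cur
lemma pvFresh {n : Int} {dist : PySem.Dict (List Int) Int} {prev cur : List (List Int)}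
    (hinv : pvInv2 n dist prev cur) {s : List Int} (hs : s ∈ cur)
    {k : Int} (hk : k ∈ PySem.List.pyRange 2 (n + 1) 1) :
    dist.contains (pvChild s k) = (prev.contains (pvChild s k) || cur.contains (pvChild s k)) := by
  obtain ⟨K, hkeys, hnd, hclosed, -⟩ := hinv
  have hk0 : (0 : Int) ≤ k := by
    have := PySem.List.mem_pyRange_one.mp hk
    omega
  apply Bool.eq_iff_iff.mpr
  simp only [PySem.Dict.contains_iff_mem_keys, hkeys, Bool.or_eq_true,
    List.contains_iff_mem, List.mem_append]
  constructor
  · rintro ((hK | hp) | hc)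
    · exfalso
      have hsm : pvChild (pvChild s k) k ∈ K ++ prev := hclosed _ hK k hk
      rw [pvChild_invol s k hk0] at hsm
      have hnd' : (K ++ (prev ++ cur)).Nodup := by
        have := hkeys ▸ hnd
        rwa [List.append_assoc] at this
      have hdis : K.Disjoint (prev ++ cur) := List.disjoint_of_nodup_append hnd'
      have hnd2 : (prev ++ cur).Nodup := (List.nodup_append.mp hnd').2.1
      have hdis2 : prev.Disjoint cur := List.disjoint_of_nodup_append hnd2
      rcases List.mem_append.mp hsm with h' | h'
      · exact hdis h' (List.mem_append_right _ hs)
      · exact hdis2 h' hs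
    · exact Or.inl hp
    · exact Or.inr hc
  · rintro (hp | hc)
    · exact Or.inl (Or.inr hp)
    · exact Or.inr hc

-- inner fold: A's freshness check against the growing dict equals B's check
-- against prev/cur/nxt, and the discovered children agree
lemma pvInnerCorr (d : Int) (s : List Int) (dist0 : PySem.Dict (List Int) Int)
    (prev cur : List (List Int)) (L : List Int)
    (hL : ∀ k ∈ L, dist0.contains (pvChild s k)
      = (prev.contains (pvChild s k) || cur.contains (pvChild s k))) :
    ∀ (dacc : PySem.Dict (List Int) Int) (ks : List (List Int)),
      (∀ c, dacc.contains c = (dist0.contains c || ks.contains c)) →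
      (L.foldl (pvStepA d s) (dacc, ks)).2 = L.foldl (pvSiftStep prev cur s) ks ∧
      (∀ c, (L.foldl (pvStepA d s) (dacc, ks)).1.contains c
        = (dist0.contains c || (L.foldl (pvSiftStep prev cur s) ks).contains c)) := by
  induction L with
  | nil => intro dacc ks hcorr; exact ⟨rfl, hcorr⟩
  | cons k L ih =>
    intro dacc ks hcorr
    have hLk := hL k (List.mem_cons_self ..)
    have hL' : ∀ k' ∈ L, dist0.contains (pvChild s k')
        = (prev.contains (pvChild s k') || cur.contains (pvChild s k')) :=
      fun k' hk' => hL k' (List.mem_cons_of_mem _ hk')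
    simp only [List.foldl_cons]
    have hcond : dacc.contains (pvChild s k)
        = (prev.contains (pvChild s k) || cur.contains (pvChild s k)
            || ks.contains (pvChild s k)) := by
      rw [hcorr _, hLk, Bool.or_assoc]
    cases hb : (prev.contains (pvChild s k) || cur.contains (pvChild s k)
        || ks.contains (pvChild s k)) with
    | true =>
      have hda : dacc.contains (pvChild s k) = true := by rw [hcond, hb]
      have hstepA : pvStepA d s (dacc, ks) k = (dacc, ks) := by
        simp only [pvStepA]; rw [hda]; simp
      have hstepB : pvSiftStep prev cur s ks k = ks := by
        simp only [pvSiftStep]; rw [hb]; simp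
      rw [hstepA, hstepB]
      exact ih hL' dacc ks hcorr
    | false =>
      have hda : dacc.contains (pvChild s k) = false := by rw [hcond, hb]
      have hstepA : pvStepA d s (dacc, ks) k
          = (dacc.insert (pvChild s k) (d + 1), ks ++ [pvChild s k]) := by
        simp only [pvStepA]; rw [hda]; simp
      have hstepB : pvSiftStep prev cur s ks k = ks ++ [pvChild s k] := by
        simp only [pvSiftStep]; rw [hb]; simp
      rw [hstepA, hstepB]
      refine ih hL' _ _ ?_
      intro c'
      rw [PySem.Dict.contains_insert, hcorr c']
      simp only [List.contains_append]
      cases h0 : dist0.contains c' <;> cases h1 : ks.contains c' <;>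
        simp [beq_eq_decide]

-- outer fold over the states of the current layer
lemma pvOuterCorr (n d : Int) (dist0 : PySem.Dict (List Int) Int)
    (prev cur : List (List Int)) :
    ∀ (states : List (List Int)),
      (∀ s ∈ states, ∀ k ∈ PySem.List.pyRange 2 (n + 1) 1,
        dist0.contains (pvChild s k)
          = (prev.contains (pvChild s k) || cur.contains (pvChild s k))) →
      ∀ (dacc : PySem.Dict (List Int) Int) (ks : List (List Int)),
        (∀ c, dacc.contains c = (dist0.contains c || ks.contains c)) →
        (states.foldl (pvLevelB n d) (dacc, ks)).2
          = states.foldl (fun nxt state =>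
              (PySem.List.pyRange 2 (n + 1) 1).foldl (pvSiftStep prev cur state) nxt) ks ∧
        (∀ c, (states.foldl (pvLevelB n d) (dacc, ks)).1.contains c
          = (dist0.contains c ||
              (states.foldl (fun nxt state =>
                (PySem.List.pyRange 2 (n + 1) 1).foldl (pvSiftStep prev cur state) nxt) ks).contains c)) := by
  intro states
  induction states with
  | nil => intro _ dacc ks hcorr; exact ⟨rfl, hcorr⟩
  | cons s states ih =>
    intro hfr dacc ks hcorr
    simp only [List.foldl_cons]
    obtain ⟨h1, h2⟩ := pvInnerCorr d s dist0 prev cur (PySem.List.pyRange 2 (n + 1) 1)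
      (hfr s (List.mem_cons_self ..)) dacc ks hcorr
    have := ih (fun s' hs' => hfr s' (List.mem_cons_of_mem _ hs'))
      ((PySem.List.pyRange 2 (n + 1) 1).foldl (pvStepA d s) (dacc, ks)).1
      ((PySem.List.pyRange 2 (n + 1) 1).foldl (pvSiftStep prev cur s) ks) h2
    rw [show pvLevelB n d (dacc, ks) s
        = (((PySem.List.pyRange 2 (n + 1) 1).foldl (pvStepA d s) (dacc, ks)).1,
           ((PySem.List.pyRange 2 (n + 1) 1).foldl (pvStepA d s) (dacc, ks)).2) from rfl]
    rw [h1]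
    exact this

-- stamping a fresh nodup layer into the dict appends its items
lemma pvStamp_items (v : Int) :
    ∀ (ks : List (List Int)) (dist : PySem.Dict (List Int) Int),
      (∀ c ∈ ks, dist.contains c = false) → ks.Nodup →
      (ks.foldl (fun D c => D.insert c v) dist).items
        = dist.items ++ ks.map (fun c => (c, v)) := by
  intro ks
  induction ks with
  | nil => intro dist _ _; simp
  | cons c ks ih =>
    intro dist hfr hnd
    simp only [List.foldl_cons, List.map_cons]
    have hc := hfr c (List.mem_cons_self ..)
    rw [ih (dist.insert c v) ?_ (List.nodup_cons.mp hnd).2]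
    · rw [PySem.Dict.items_insert_of_not_contains _ _ (by simp [hc])]
      simp
    · intro c' hc'
      rw [PySem.Dict.contains_insert, hfr c' (List.mem_cons_of_mem _ hc')]
      have hne : c ≠ c' := fun h => (List.nodup_cons.mp hnd).1 (h ▸ hc')
      simp [Ne.symm hne]

-- every generated child of the layer ends up among the new dict's keys (coverage)
lemma pvStepA_contains_mono (d : Int) (s : List Int)
    (p : PySem.Dict (List Int) Int × List (List Int)) (k : Int) (c : List Int)
    (h : p.1.contains c = true) : (pvStepA d s p k).1.contains c = true := by
  cases hb : p.1.contains (pvChild s k) with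
  | true => simpa [pvStepA, hb] using h
  | false => simp [pvStepA, hb, PySem.Dict.contains_insert, h]

lemma pvFold_contains_mono (d : Int) (s : List Int) (L : List Int)
    (p : PySem.Dict (List Int) Int × List (List Int)) (c : List Int)
    (h : p.1.contains c = true) :
    ((L.foldl (pvStepA d s) p).1).contains c = true := by
  induction L generalizing p with
  | nil => exact h
  | cons k L ih => exact ih _ (pvStepA_contains_mono d s p k c h)

lemma pvInnerCover (d : Int) (s : List Int) (L : List Int)
    (p : PySem.Dict (List Int) Int × List (List Int)) :
    ∀ k ∈ L, ((L.foldl (pvStepA d s) p).1).contains (pvChild s k) = true := by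
  induction L generalizing p with
  | nil => intro k hk; cases hk
  | cons k0 L ih =>
    intro k hk
    simp only [List.foldl_cons]
    rcases List.mem_cons.mp hk with rfl | hk'
    · apply pvFold_contains_mono
      cases hb : p.1.contains (pvChild s k) with
      | true => simp [pvStepA, hb]
      | false => simp [pvStepA, hb, PySem.Dict.contains_insert_self]
    · exact ih _ k hk'

lemma pvLevel_contains_mono (n d : Int) (states : List (List Int))
    (p : PySem.Dict (List Int) Int × List (List Int)) (c : List Int)
    (h : p.1.contains c = true) :
    ((states.foldl (pvLevelB n d) p).1).contains c = true := by
  induction states generalizing p with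
  | nil => exact h
  | cons s states ih =>
    simp only [List.foldl_cons]
    exact ih _ (by unfold pvLevelB; exact pvFold_contains_mono d s _ p c h)

lemma pvOuterCover (n d : Int) (states : List (List Int))
    (p : PySem.Dict (List Int) Int × List (List Int)) :
    ∀ s ∈ states, ∀ k ∈ PySem.List.pyRange 2 (n + 1) 1,
      ((states.foldl (pvLevelB n d) p).1).contains (pvChild s k) = true := by
  induction states generalizing p with
  | nil => intro s hs; cases hs
  | cons s0 states ih =>
    intro s hs k hk
    simp only [List.foldl_cons]
    rcases List.mem_cons.mp hs with rfl | hs'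
    · exact pvLevel_contains_mono n d states _ _
        (by unfold pvLevelB; exact pvInnerCover d s _ _ k hk)
    · exact ih _ s hs' k hk

-- freshness / nodup / items of one level fold, with no permutation baggage
lemma pvLevelFold_basic (n d : Int) (f : List (List Int)) :
    ∀ (dist D : PySem.Dict (List Int) Int) (ks : List (List Int)),
      f.foldl (pvLevelB n d) (dist, []) = (D, ks) →
      dist.keys.Nodup →
      D.items = dist.items ++ ks.map (fun c => (c, d + 1)) ∧
      (∀ c ∈ ks, dist.contains c = false) ∧ ks.Nodup := by
  induction f with
  | nil =>
    intro dist D ks h _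
    simp only [List.foldl_nil, Prod.mk.injEq] at h
    obtain ⟨rfl, rfl⟩ := h
    simp
  | cons s f ih =>
    intro dist D ks h hnd
    simp only [List.foldl_cons] at h
    have hlev : pvLevelB n d (dist, []) s
        = (PySem.List.pyRange 2 (n + 1) 1).foldl (pvStepA d s) (dist, []) := rfl
    rcases hE : (PySem.List.pyRange 2 (n + 1) 1).foldl (pvStepA d s) (dist, []) with ⟨D1, ks1⟩
    rw [hlev, hE] at h
    obtain ⟨h1, h2, h3, -⟩ := pvFold_spec _ d s dist D1 ks1 hE
    have hkeys1 : D1.keys = dist.keys ++ ks1 := pvItems_keys h1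
    have hnd1 : D1.keys.Nodup := pvItems_nodup h1 hnd h3 h2
    rw [pvFoldl_acc_shift _ (pvLevelB_shift n d) f D1 ks1] at h
    rcases hF : f.foldl (pvLevelB n d) (D1, []) with ⟨D2, ks2⟩
    rw [hF] at h
    simp only [Prod.mk.injEq] at h
    obtain ⟨rfl, rfl⟩ := h
    obtain ⟨g1, g2, g3⟩ := ih D1 D2 ks2 hF hnd1
    have hcontmono : ∀ c, dist.contains c = true → D1.contains c = true := by
      intro c hcc
      rw [PySem.Dict.contains_iff_mem_keys] at hcc ⊢
      rw [hkeys1]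
      exact List.mem_append_left _ hcc
    refine ⟨?_, ?_, ?_⟩
    · rw [g1, h1]
      simp [List.append_assoc]
    · intro c hcm
      rcases List.mem_append.mp hcm with hcm' | hcm'
      · exact h2 c hcm'
      · cases hdc : dist.contains c with
        | false => rfl
        | true => have := g2 c hcm'; rw [hcontmono c hdc] at this; exact this
    · refine List.nodup_append.mpr ⟨h3, g3, ?_⟩
      have hdis : ∀ a ∈ ks1, a ∉ ks2 := by
        intro a ha hb
        have : D1.contains a = true := by
          rw [PySem.Dict.contains_iff_mem_keys, hkeys1]
          exact List.mem_append_right _ ha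
        rw [g2 a hb] at this
        exact Bool.noConfusion this
      exact fun a a_1 b a_2 => ne_of_mem_of_not_mem a_1 fun a => hdis b (by assumption) a_2

-- one level of the synchronized loop equals one recursive step of pvGrow, and the
-- two-layer invariant is maintained
lemma pvBC (n : Int) :
    ∀ (fuel : Nat) (dist : PySem.Dict (List Int) Int) (prev cur : List (List Int)) (d : Int),
      pvInv2 n dist prev cur →
      pvLoopB n fuel dist cur d = pvGrow n fuel dist prev cur d := by
  intro fuel
  induction fuel with
  | zero => intro dist prev cur d _; rfl
  | succ fuel ih =>
    intro dist prev cur d hinv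
    cases cur with
    | nil => rfl
    | cons s f =>
      obtain ⟨K, hkeys, hnd, hclosed, hprevcl⟩ := hinv
      -- the level fold and its characterization
      rcases hP : (s :: f).foldl (pvLevelB n d) (dist, []) with ⟨D, ks⟩
      have hfr : ∀ s' ∈ (s :: f), ∀ k ∈ PySem.List.pyRange 2 (n + 1) 1,
          dist.contains (pvChild s' k)
            = ((prev.contains (pvChild s' k)) || ((s :: f).contains (pvChild s' k))) :=
        fun s' hs' k hk => pvFresh ⟨K, hkeys, hnd, hclosed, hprevcl⟩ hs' hk
      obtain ⟨hcorr2, hcorrD⟩ := pvOuterCorr n d dist prev (s :: f) (s :: f) hfr dist []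
        (by intro c; simp)
      rw [hP] at hcorr2 hcorrD
      simp only at hcorr2 hcorrD
      have hexp : pvExpand n prev (s :: f) = ks := by
        rw [pvExpand, ← hcorr2]
      -- freshness / nodup / items of the discovered layer (from the A-side fold shape)
      have hbasic := pvLevelFold_basic n d (s :: f) dist D ks hP hnd
      obtain ⟨h1, h2, h3⟩ := hbasic
      -- the stamped dict equals D
      have hstamp : ks.foldl (fun Dd c => Dd.insert c (d + 1)) dist = D := by
        apply PySem.Dict.ext
        rw [pvStamp_items (d + 1) ks dist h2 h3, h1]
      -- unfold one step of each loop
      have hLB : pvLoopB n (fuel + 1) dist (s :: f) d = pvLoopB n fuel D ks (d + 1) := by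
        simp only [pvLoopB, hP]
      have hG : pvGrow n (fuel + 1) dist prev (s :: f) d
          = pvGrow n fuel (ks.foldl (fun Dd c => Dd.insert c (d + 1)) dist) (s :: f)
              (pvExpand n prev (s :: f)) (d + 1) := by
        simp only [pvGrow, hexp]
      rw [hLB, hG, hexp, hstamp]
      -- maintain the invariant for the next level
      refine ih D (s :: f) ks (d + 1) ⟨K ++ prev, ?_, ?_, ?_, ?_⟩
      · rw [pvItems_keys h1, hkeys]
      · exact pvItems_nodup h1 hnd h3 h2
      · intro c hc k hk
        rcases List.mem_append.mp hc with hc' | hc'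
        · exact List.mem_append_left _ (hclosed c hc' k hk)
        · have := hprevcl c hc' k hk
          rw [List.append_assoc]
          simpa [List.append_assoc] using this
      · intro s' hs' k hk
        have hcov := pvOuterCover n d (s :: f) (dist, ([] : List (List Int))) s' hs' k hk
        rw [hP] at hcov
        simp only at hcov
        rw [PySem.Dict.contains_iff_mem_keys, pvItems_keys h1, hkeys] at hcov
        simpa [List.append_assoc] using hcov

lemma pvPorts_eq : ∀ (n : Int), bfs_optimal_distances_py n = bfs_optimal_distances_py_alt n := by
  intro n
  show (pvLoopA n (pvFuelA n) (PySem.Dict.ofList [(pvIdent n, 0)]) [pvIdent n]).items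
      = (pvGrow n (pvFuelB n) (PySem.Dict.ofList [(pvIdent n, 0)]) [] [pvIdent n] 0).items
  set dist0 := PySem.Dict.ofList [(pvIdent n, (0 : Int))] with hdist0
  have hkeys0 : dist0.keys = [pvIdent n] := by
    rw [hdist0]
    simp only [PySem.Dict.keys, pvInit_items]
    rfl
  have hnd0 : dist0.keys.Nodup := by rw [hkeys0]; simp
  have hinv0 : pvInv n dist0 [pvIdent n] := by
    refine ⟨hnd0, ?_, ?_⟩
    · intro u hu
      rw [hkeys0] at hu
      simp at hu
      subst hu
      exact List.Perm.refl _
    · intro u hu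
      simp at hu
      subst hu
      rw [hkeys0]
      simp
  have hf0 : ∀ s ∈ [pvIdent n], dist0.get? s = some 0 := by
    intro u hu
    simp at hu
    subst hu
    exact PySem.Dict.get?_of_mem_items _ (by rw [pvInit_items]; simp) hnd0
  have hsize0 : dist0.size = 1 := by
    rw [hdist0]
    simp only [PySem.Dict.size, pvInit_items]
    rfl
  have hma0 : pvMuA n dist0 [pvIdent n] ≤ pvFuelA n := by
    simp only [pvMuA, hsize0, pvFuelA, pvN, pvC, List.length_cons, List.length_nil]
    have : (n.toNat.factorial - 1) * n.toNat ≤ n.toNat.factorial * n.toNat :=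
      Nat.mul_le_mul_right _ (Nat.sub_le _ _)
    omega
  have hmb0 : pvMuB n dist0 [pvIdent n] ≤ pvFuelB n := by
    simp only [pvMuB, hsize0, pvFuelB, pvN]
    simp
  have hAB := pvMain n (pvFuelB n) dist0 [pvIdent n] 0 (pvFuelA n) hinv0 hf0 hmb0 hma0
  have hinv2 : pvInv2 n dist0 [] [pvIdent n] := by
    refine ⟨[], by simpa using hkeys0, hnd0, ?_, ?_⟩
    · intro c hc; cases hc
    · intro s hs; cases hs
  have hBC := pvBC n (pvFuelB n) dist0 [] [pvIdent n] 0 hinv2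
  rw [hAB, hBC]

-- ===== VERDICT (by name: the statement is the Claim_ definition above) =====
theorem bfs_optimal_distances_py_spec : Claim_equal_bfs_optimal_distances_py := by
  intro n _
  unfold Spec_bfs_optimal_distances_py
  exact (pvPorts_eq n).symm ▸ rfl
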